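-- pv_equiv track=rewrite | github.com/thealper2/codewars-solutions | 7-kyu/duplicate_sandwich.py | duplicate_sandwich
-- ===== SOURCE A (Python) =====
-- def duplicate_sandwich(arr):
--     seen = {}
--     for i, item in enumerate(arr):
--         if item in seen:
--             start = seen[item] + 1
--             end = i
--             return arr[start:end]
--
--         seen[item] = i
-- ===== SOURCE B (Python) =====
-- def duplicate_sandwich(arr):
--     # Staged value-based approach: count occurrences in one pass, compute the index
--     # of the second occurrence of every duplicated value, and end the sandwich at
--     # the earliest such index, starting just after that value's first occurrence.
--     counts = {}
--     for x in arr: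
--         counts[x] = counts.get(x, 0) + 1
--     seconds = [arr.index(x, arr.index(x) + 1) for x in counts if counts[x] >= 2]
--     if not seconds:
--         return None
--     end = min(seconds)
--     return arr[arr.index(arr[end]) + 1:end]
-- ===== Notes on version B (the rewrite author's own statement) =====
-- stated objective: alternative
-- what changed: Replaces A's single left-to-right scan with a seen-index dict and early return by a staged value-based computation: count occurrences in one pass, collect the second-occurrence index of every duplicated distinct value, take the minimum of those indices as the end of the sandwich, and slice from just after that value's first occurrence.
import Mathlib
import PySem

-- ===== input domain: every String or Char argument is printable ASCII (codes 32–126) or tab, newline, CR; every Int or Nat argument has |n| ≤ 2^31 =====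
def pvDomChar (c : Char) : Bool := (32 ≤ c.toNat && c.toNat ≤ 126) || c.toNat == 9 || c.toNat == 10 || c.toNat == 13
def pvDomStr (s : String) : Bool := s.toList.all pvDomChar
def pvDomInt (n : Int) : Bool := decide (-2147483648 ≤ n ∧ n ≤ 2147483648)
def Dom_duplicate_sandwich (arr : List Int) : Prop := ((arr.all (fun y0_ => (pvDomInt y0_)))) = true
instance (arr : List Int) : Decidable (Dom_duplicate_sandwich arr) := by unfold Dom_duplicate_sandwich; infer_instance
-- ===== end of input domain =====

-- B replaces A's single left-to-right scan with a seen-dict by a staged value-based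
-- computation: count occurrences, take the second-occurrence index of every duplicated
-- distinct value, and end the sandwich at the minimum of those indices (alternative).

-- ===== PORT A =====
-- A's loop: 'seen' maps each value of the scanned prefix to its (first) index;
-- 'item in seen' / 'seen[item]' is the match on Dict.get?.
def dsA_loop (arr : List Int) (seen : PySem.Dict Int Int) (i : Nat) (rest : List Int) :
    Option (List Int) :=
  match rest with
  | [] => none
  | item :: rs =>
    match PySem.Dict.get? seen item with
    | some j => some (PySem.List.slice arr (some (j + 1)) (some (i : Int)))
    | none => dsA_loop arr (PySem.Dict.insert seen item (i : Int)) (i + 1) rs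

def duplicate_sandwich (arr : List Int) : Option (List Int) :=
  dsA_loop arr PySem.Dict.empty 0 arr

-- ===== PORT B =====
-- B: seconds = [arr.index(v, arr.index(v)+1) for v in dict.fromkeys(arr) if arr.count(v) >= 2];
-- arr.index(v, j+1) is ported by hand as j+1 + index of v in arr[j+1:] (exact: same first
-- index ≥ j+1; it never raises here since count(v) ≥ 2, so the 'none' arms are unreachable).
def dsB_second (arr : List Int) (v : Int) : Int :=
  match PySem.List.index? arr v with
  | some j =>
    match PySem.List.index? (arr.drop (j + 1)) v with
    | some k => ((j : Int) + 1 + (k : Int))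
    | none => 0
  | none => 0

def duplicate_sandwich_alt (arr : List Int) : Option (List Int) :=
  -- counts = {}; for x in arr: counts[x] = counts.get(x, 0) + 1
  let counts : PySem.Dict Int Int :=
    arr.foldl (fun d x => PySem.Dict.insert d x (PySem.Dict.getD d x 0 + 1)) PySem.Dict.empty
  -- 'for x in counts' iterates the keys; counts[x] is present for every key, so getD is exact
  let seconds : List Int :=
    (counts.keys.filter (fun x => decide ((2 : Int) ≤ PySem.Dict.getD counts x 0))).map
      (dsB_second arr)
  -- 'if not seconds: return None' / 'end = min(seconds)' — min? is none exactly on []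
  match PySem.List.min? seconds (fun x => x) with
  | none => none
  | some e =>
    match PySem.List.pyGet? arr e with      -- arr[end]
    | some v =>
      match PySem.List.index? arr v with    -- arr.index(arr[end])
      | some j => some (PySem.List.slice arr (some ((j : Int) + 1)) (some e))
      | none => none
    | none => none

-- ===== PRECONDITION & SPEC =====
def Spec_duplicate_sandwich (arr : List Int) (out : Option (List Int)) : Prop := out = duplicate_sandwich_alt arr
instance (arr : List Int) (out : Option (List Int)) : Decidable (Spec_duplicate_sandwich arr out) := by unfold Spec_duplicate_sandwich; infer_instance

-- ===== CLAIM (what is proved, stated in full; the proofs are below) =====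
def Claim_equal_duplicate_sandwich : Prop := ∀ (arr : List Int), Dom_duplicate_sandwich arr → Spec_duplicate_sandwich arr (duplicate_sandwich arr)

-- ===== LEMMAS AND PROOFS =====

-- 'index i has a prefix-duplicate': arr[i] occurs among arr[0..i-1].
def pdB (arr : List Int) (i : Nat) : Bool :=
  match arr[i]? with
  | some v => (arr.take i).contains v
  | none => false

theorem mem_take_intro {l : List Int} {i p : Nat} (h1 : i < p) (hi : i < l.length) :
    l[i] ∈ l.take p := by
  have hlen : i < (l.take p).length := by simp [List.length_take]; omega
  have := List.getElem_take (xs := l) (h := hlen)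
  rw [← this]
  exact List.getElem_mem _

theorem mem_take_elim {l : List Int} {v : Int} {p : Nat} (h : v ∈ l.take p) :
    ∃ i, i < p ∧ ∃ (hi : i < l.length), l[i] = v := by
  rcases List.getElem_of_mem h with ⟨i, hi, hv⟩
  have hip : i < p := by simp [List.length_take] at hi; omega
  have hil : i < l.length := by simp [List.length_take] at hi; omega
  exact ⟨i, hip, hil, by rw [← hv]; exact (List.getElem_take (h := hi)).symm⟩

-- a duplicated value has a well-defined second occurrence, and that index is a prefix-duplicate index
theorem second_occ (arr : List Int) (w : Int) (hw : w ∈ arr) (hc : 2 ≤ PySem.List.count arr w) :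
    ∃ (jw kw : Nat), PySem.List.index? arr w = some jw ∧
      PySem.List.index? (arr.drop (jw + 1)) w = some kw ∧
      dsB_second arr w = ((jw + 1 + kw : Nat) : Int) ∧
      arr[jw + 1 + kw]? = some w ∧ w ∈ arr.take (jw + 1 + kw) := by
  rcases Option.isSome_iff_exists.mp
    ((PySem.List.index?_isSome_iff arr w).mpr hw) with ⟨jw, hj⟩
  rcases PySem.List.getElem_of_index?_eq_some hj with ⟨hjlt, hjval, hjmin⟩
  have hnotbefore : w ∉ arr.take jw := by
    intro hmem
    rcases mem_take_elim hmem with ⟨i, hip, hil, hiv⟩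
    exact hjmin i hip hiv
  have htake1 : arr.take (jw + 1) = arr.take jw ++ [w] := by
    rw [List.take_add_one, List.getElem?_eq_getElem hjlt, hjval]; rfl
  have hcnt : PySem.List.count arr w = List.count w arr := PySem.List.count_eq arr w
  have hsplit : List.count w arr
      = List.count w (arr.take (jw + 1)) + List.count w (arr.drop (jw + 1)) := by
    conv_lhs => rw [← List.take_append_drop (jw + 1) arr]
    rw [List.count_append]
  have htakecnt : List.count w (arr.take (jw + 1)) = 1 := by
    rw [htake1, List.count_append]
    rw [List.count_eq_zero.mpr hnotbefore]
    simp
  have hdropmem : w ∈ arr.drop (jw + 1) := by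
    rw [hcnt, hsplit, htakecnt] at hc
    exact List.count_pos_iff.mp (by omega)
  rcases Option.isSome_iff_exists.mp
    ((PySem.List.index?_isSome_iff _ w).mpr hdropmem) with ⟨kw, hk⟩
  rcases PySem.List.getElem_of_index?_eq_some hk with ⟨hklt, hkval, _⟩
  have hplen : jw + 1 + kw < arr.length := by
    simp [List.length_drop] at hklt; omega
  have hgetp : arr[jw + 1 + kw]'hplen = w := by
    rw [← hkval]
    exact List.getElem_drop.symm
  refine ⟨jw, kw, hj, hk, ?_, ?_, ?_⟩
  · unfold dsB_second
    simp only [hj, hk]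
    push_cast; ring
  · rw [List.getElem?_eq_getElem hplen, hgetp]
  · have := mem_take_intro (l := arr) (i := jw) (p := jw + 1 + kw) (by omega) hjlt
    rwa [hjval] at this


theorem inv_step (arr : List Int) (i : Nat) (item : Int) (seen : PySem.Dict Int Int)
    (hget : arr[i]? = some item) (hnotmem : item ∉ arr.take i)
    (hinv : ∀ x, PySem.Dict.get? seen x
        = (PySem.List.index? (arr.take i) x).map (fun k => (k : Int))) :
    ∀ x, PySem.Dict.get? (PySem.Dict.insert seen item (i : Int)) x
        = (PySem.List.index? (arr.take (i + 1)) x).map (fun k => (k : Int)) := by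
  intro x
  have hlen : (arr.take i).length = i := by
    have : i < arr.length := (List.getElem?_eq_some_iff.mp hget).1
    simp [List.length_take]; omega
  have htake1 : arr.take (i + 1) = arr.take i ++ [item] := by
    rw [List.take_add_one, hget]; rfl
  by_cases hx : x = item
  · subst hx
    rw [PySem.Dict.get?_insert_self, htake1,
      PySem.List.index?_append_singleton_self _ _ hnotmem]
    simp [hlen]
  · rw [PySem.Dict.get?_insert_of_ne _ _ hx, hinv x, htake1]
    by_cases hxmem : x ∈ arr.take i
    · rw [PySem.List.index?_append_of_mem _ hxmem]
    · have h1 : PySem.List.index? (arr.take i) x = none :=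
        (PySem.List.index?_eq_none_iff _ _).mpr hxmem
      have h2 : PySem.List.index? (arr.take i ++ [item]) x = none := by
        apply (PySem.List.index?_eq_none_iff _ _).mpr
        simp [hxmem, hx]
      rw [h1, h2]

-- A's loop finds nothing when no index has a prefix-duplicate
theorem dsA_none (arr : List Int) (hno : ∀ i, pdB arr i = false) :
    ∀ (rest : List Int) (i : Nat) (seen : PySem.Dict Int Int),
      arr.drop i = rest →
      (∀ x, PySem.Dict.get? seen x
          = (PySem.List.index? (arr.take i) x).map (fun k => (k : Int))) →
      dsA_loop arr seen i rest = none := by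
  intro rest
  induction rest with
  | nil => intro i seen _ _; simp [dsA_loop]
  | cons item rs ih =>
    intro i seen hdrop hinv
    have hget : arr[i]? = some item := by
      have h0 : (arr.drop i)[0]? = arr[i + 0]? := List.getElem?_drop
      rw [hdrop] at h0
      simpa using h0.symm
    have hnotmem : item ∉ arr.take i := by
      have := hno i
      unfold pdB at this
      rw [hget] at this
      simpa using this
    have hnone : PySem.List.index? (arr.take i) item = none :=
      (PySem.List.index?_eq_none_iff _ _).mpr hnotmem
    simp only [dsA_loop]
    rw [hinv item, hnone]
    apply ih
    · rw [← List.tail_drop, hdrop]; rfl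
    · exact inv_step arr i item seen hget hnotmem hinv

-- A's loop returns the slice at the least prefix-duplicate index e
theorem dsA_some (arr : List Int) (e : Nat) (v : Int) (j0 : Nat)
    (hv : arr[e]? = some v) (hmem : v ∈ arr.take e)
    (hmin : ∀ i, i < e → pdB arr i = false)
    (hj0 : PySem.List.index? arr v = some j0) :
    ∀ (rest : List Int) (i : Nat) (seen : PySem.Dict Int Int),
      arr.drop i = rest → i ≤ e →
      (∀ x, PySem.Dict.get? seen x
          = (PySem.List.index? (arr.take i) x).map (fun k => (k : Int))) →
      dsA_loop arr seen i rest
        = some (PySem.List.slice arr (some ((j0 : Int) + 1)) (some (e : Int))) := by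
  intro rest
  induction rest with
  | nil =>
    intro i seen hdrop hie _
    exfalso
    have hlen : arr.length ≤ i := by
      by_contra h
      have := List.drop_eq_nil_iff.mp hdrop
      omega
    have : e < arr.length := (List.getElem?_eq_some_iff.mp hv).1
    omega
  | cons item rs ih =>
    intro i seen hdrop hie hinv
    have hget : arr[i]? = some item := by
      have h0 : (arr.drop i)[0]? = arr[i + 0]? := List.getElem?_drop
      rw [hdrop] at h0
      simpa using h0.symm
    by_cases hi : i = e
    · subst hi
      have hitem : item = v := by
        rw [hget] at hv; exact Option.some.inj hv
      subst hitem
      have hidx : PySem.List.index? (arr.take i) item = some j0 := by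
        have h2 : PySem.List.index? (arr.take i ++ arr.drop i) item
            = PySem.List.index? (arr.take i) item :=
          PySem.List.index?_append_of_mem (arr.drop i) hmem
        rw [List.take_append_drop] at h2
        rw [← h2, hj0]
      simp only [dsA_loop]
      rw [hinv item, hidx]
      rfl
    · have hilt : i < e := by omega
      have hnotmem : item ∉ arr.take i := by
        have := hmin i hilt
        unfold pdB at this
        rw [hget] at this
        simpa using this
      have hnone : PySem.List.index? (arr.take i) item = none :=
        (PySem.List.index?_eq_none_iff _ _).mpr hnotmem
      simp only [dsA_loop]
      rw [hinv item, hnone]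
      apply ih
      · rw [← List.tail_drop, hdrop]; rfl
      · omega
      · exact inv_step arr i item seen hget hnotmem hinv

-- B's seconds list, rewritten through the counter lemmas: keys of the one-pass counts
-- dict are the distinct values in first-occurrence order, and getD is the count.
def dsB_canon (arr : List Int) : Option (List Int) :=
  match PySem.List.min? (((PySem.List.dedup arr).filter
      (fun v => decide (2 ≤ PySem.List.count arr v))).map (dsB_second arr)) (fun x => x) with
  | none => none
  | some e =>
    match PySem.List.pyGet? arr e with
    | some v =>
      match PySem.List.index? arr v with
      | some j => some (PySem.List.slice arr (some ((j : Int) + 1)) (some e))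
      | none => none
    | none => none

theorem alt_canon (arr : List Int) : duplicate_sandwich_alt arr = dsB_canon arr := by
  unfold duplicate_sandwich_alt dsB_canon
  have hfilt : List.filter (fun x => decide (2 ≤ (PySem.Dict.counter arr).getD x 0))
        (PySem.Dict.counter arr).keys
      = (PySem.List.dedup arr).filter (fun v => decide (2 ≤ PySem.List.count arr v)) := by
    rw [PySem.Dict.keys_counter, PySem.List.dedup_eq_ofList]
    apply List.filter_congr
    intro x _
    rw [PySem.Dict.getD_counter, PySem.List.count_eq]
    simp only [decide_eq_decide]
    omega
  refine congrArg (fun l : List Int =>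
    match PySem.List.min? (List.map (dsB_second arr) l) (fun x : Int => x) with
    | none => none
    | some e =>
      match PySem.List.pyGet? arr e with
      | some v =>
        match PySem.List.index? arr v with
        | some j => some (PySem.List.slice arr (some ((j : Int) + 1)) (some e))
        | none => none
      | none => none) ?_
  rw [PySem.Dict.foldl_insert_getD_add_one_eq_counter]
  exact hfilt

-- B returns none when no index has a prefix-duplicate
theorem dsB_none (arr : List Int) (hno : ∀ i, pdB arr i = false) :
    duplicate_sandwich_alt arr = none := by
  have hfilter : (PySem.List.dedup arr).filter (fun v => decide (2 ≤ PySem.List.count arr v)) = [] := by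
    rw [List.filter_eq_nil_iff]
    intro v hv hdec
    have hc : 2 ≤ PySem.List.count arr v := of_decide_eq_true hdec
    have hva : v ∈ arr := (PySem.List.mem_dedup arr v).mp hv
    rcases second_occ arr v hva hc with ⟨jw, kw, _, _, _, hp, hmemp⟩
    have : pdB arr (jw + 1 + kw) = true := by
      unfold pdB
      rw [hp]
      simpa using hmemp
    rw [hno (jw + 1 + kw)] at this
    exact Bool.noConfusion this
  rw [alt_canon]
  unfold dsB_canon
  rw [hfilter]
  rfl

-- B returns the same slice at the least prefix-duplicate index e
theorem dsB_some (arr : List Int) (e : Nat) (v : Int) (j0 : Nat)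
    (hv : arr[e]? = some v) (hmem : v ∈ arr.take e)
    (hmin : ∀ i, i < e → pdB arr i = false)
    (hj0 : PySem.List.index? arr v = some j0) :
    duplicate_sandwich_alt arr
      = some (PySem.List.slice arr (some ((j0 : Int) + 1)) (some (e : Int))) := by
  have helt : e < arr.length := (List.getElem?_eq_some_iff.mp hv).1
  have hev : arr[e]'helt = v := (List.getElem?_eq_some_iff.mp hv).2
  rcases PySem.List.getElem_of_index?_eq_some hj0 with ⟨hj0lt, hj0val, hj0min⟩
  rcases mem_take_elim hmem with ⟨i0, hi0e, hi0l, hi0v⟩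
  have hj0e : j0 < e := by
    by_contra h
    exact hj0min i0 (by omega) hi0v
  have hva : v ∈ arr := List.mem_of_mem_take hmem
  -- v is duplicated
  have hc : 2 ≤ PySem.List.count arr v := by
    rw [PySem.List.count_eq]
    have hsplit : List.count v arr
        = List.count v (arr.take e) + List.count v (arr.drop e) := by
      conv_lhs => rw [← List.take_append_drop e arr]
      rw [List.count_append]
    have h1 : 1 ≤ List.count v (arr.take e) := List.count_pos_iff.mpr hmem
    have h2 : 1 ≤ List.count v (arr.drop e) := by
      apply List.count_pos_iff.mpr
      rw [List.drop_eq_getElem_cons helt, hev]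
      exact List.mem_cons_self
    omega
  rcases second_occ arr v hva hc with ⟨jw, kw, hj, hk, hds, hp, hmemp⟩
  have hjw : jw = j0 := by rw [hj0] at hj; exact (Option.some.inj hj).symm
  rw [hjw] at hk hds hp hmemp
  -- the second occurrence of v is exactly e
  have hpe : j0 + 1 + kw = e := by
    have hge : e ≤ j0 + 1 + kw := by
      by_contra h
      have : pdB arr (j0 + 1 + kw) = true := by
        unfold pdB
        rw [hp]
        simpa using hmemp
      rw [hmin _ (by omega)] at this
      exact Bool.noConfusion this
    rcases PySem.List.getElem_of_index?_eq_some hk with ⟨hklt, hkval, hkmin⟩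
    have hle : kw ≤ e - (j0 + 1) := by
      by_contra h
      have hm : e - (j0 + 1) < kw := by omega
      have hmlt : e - (j0 + 1) < (arr.drop (j0 + 1)).length := by
        simp [List.length_drop]; omega
      have : (arr.drop (j0 + 1))[e - (j0 + 1)]'hmlt = v := by
        have : (arr.drop (j0 + 1))[e - (j0 + 1)]'hmlt = arr[j0 + 1 + (e - (j0 + 1))]'(by omega) :=
          List.getElem_drop
        rw [this]
        have : j0 + 1 + (e - (j0 + 1)) = e := by omega
        simp_rw [this]
        exact hev
      exact hkmin _ hm this
    omega
  -- e is a member of seconds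
  have hvfilter : v ∈ (PySem.List.dedup arr).filter (fun v => decide (2 ≤ PySem.List.count arr v)) :=
    List.mem_filter.mpr ⟨(PySem.List.mem_dedup arr v).mpr hva, decide_eq_true hc⟩
  have hdsv : dsB_second arr v = (e : Int) := by rw [hds, hpe]
  have hemem : (e : Int) ∈ ((PySem.List.dedup arr).filter
      (fun v => decide (2 ≤ PySem.List.count arr v))).map (dsB_second arr) :=
    List.mem_map.mpr ⟨v, hvfilter, hdsv⟩
  -- every element of seconds is ≥ e
  have hlb : ∀ s ∈ ((PySem.List.dedup arr).filter
      (fun v => decide (2 ≤ PySem.List.count arr v))).map (dsB_second arr), (e : Int) ≤ s := by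
    intro s hs
    rcases List.mem_map.mp hs with ⟨w, hwf, hws⟩
    rcases List.mem_filter.mp hwf with ⟨hwd, hwc⟩
    have hwa : w ∈ arr := (PySem.List.mem_dedup arr w).mp hwd
    have hwcnt : 2 ≤ PySem.List.count arr w := of_decide_eq_true hwc
    rcases second_occ arr w hwa hwcnt with ⟨jw', kw', _, _, hds', hp', hmemp'⟩
    have hpd : pdB arr (jw' + 1 + kw') = true := by
      unfold pdB
      rw [hp']
      simpa using hmemp'
    have hge : e ≤ jw' + 1 + kw' := by
      by_contra h
      rw [hmin _ (by omega)] at hpd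
      exact Bool.noConfusion hpd
    rw [← hws, hds']
    exact_mod_cast hge
  -- min of seconds is e
  have hminval : PySem.List.min? (((PySem.List.dedup arr).filter
      (fun v => decide (2 ≤ PySem.List.count arr v))).map (dsB_second arr)) (fun x => x)
      = some ((e : Nat) : Int) := by
    rcases hm : PySem.List.min? (((PySem.List.dedup arr).filter
        (fun v => decide (2 ≤ PySem.List.count arr v))).map (dsB_second arr)) (fun x => x)
        with _ | m
    · have : (((PySem.List.dedup arr).filter
          (fun v => decide (2 ≤ PySem.List.count arr v))).map (dsB_second arr)) = [] :=
        (PySem.List.min?_eq_none_iff _ _).mp hm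
      rw [this] at hemem
      exact absurd hemem (List.not_mem_nil)
    · have hmmem := PySem.List.min?_mem hm
      have h1 : (e : Int) ≤ m := hlb m hmmem
      have h2 : m ≤ (e : Int) := PySem.List.min?_isMin hm _ hemem
      rw [le_antisymm h2 h1]
  rw [alt_canon]
  unfold dsB_canon
  simp only [hminval, PySem.List.pyGet?_natCast, hv, hj0]

-- ===== VERDICT (by name: the statement is the Claim_ definition above) =====
theorem duplicate_sandwich_spec : Claim_equal_duplicate_sandwich := by
  intro arr _
  unfold Spec_duplicate_sandwich duplicate_sandwich
  have hinv0 : ∀ x, PySem.Dict.get? (PySem.Dict.empty (κ := Int) (ν := Int)) x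
      = (PySem.List.index? (arr.take 0) x).map (fun k => (k : Int)) := by
    intro x; simp [PySem.Dict.get?_empty, PySem.List.index?]
  by_cases hex : ∃ i, pdB arr i = true
  · have he := Nat.find_spec hex
    have hmin : ∀ i, i < Nat.find hex → pdB arr i = false := by
      intro i hi
      have := Nat.find_min hex hi
      simpa using this
    set e := Nat.find hex with hedef
    unfold pdB at he
    rcases hv : arr[e]? with _ | v
    · rw [hv] at he; exact absurd he (by simp)
    · rw [hv] at he
      have hmem : v ∈ arr.take e := by simpa using he
      have hva : v ∈ arr := List.mem_of_mem_take hmem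
      rcases Option.isSome_iff_exists.mp
        ((PySem.List.index?_isSome_iff arr v).mpr hva) with ⟨j0, hj0⟩
      rw [dsA_some arr e v j0 hv hmem hmin hj0 arr 0 PySem.Dict.empty rfl (Nat.zero_le e) hinv0,
        dsB_some arr e v j0 hv hmem hmin hj0]
  · have hno : ∀ i, pdB arr i = false := by
      intro i; cases h : pdB arr i
      · rfl
      · exact absurd ⟨i, h⟩ hex
    rw [dsA_none arr hno arr 0 PySem.Dict.empty rfl hinv0, dsB_none arr hno]
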